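-- pv_equiv track=rewrite | github.com/pypi-data/pypi-mirror-349 | packages/countsy/countsy-1.0.8-py3-none-any.whl/src/cli.py | return_lines_of_non_blank_code
-- ===== SOURCE A (Python) =====
-- def return_lines_of_non_blank_code(file: list) -> [int, int]:
-- 	ctr_code = 0
-- 	ctr_blanks = 0
--
-- 	for el in file:
-- 		stripped = el.strip()
-- 		if stripped != "":
-- 			ctr_code += 1
-- 		else:
-- 			ctr_blanks += 1
--
-- 	return {"code": ctr_code, "blanks": ctr_blanks}
-- ===== SOURCE B (Python) =====
-- def return_lines_of_non_blank_code(file: list) -> [int, int]: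
-- 	# Divide and conquer: recursively split the index range in half, count
-- 	# (non-blank, blank) in each half and combine; depth is O(log n).
-- 	def count(lo, hi):
-- 		n = hi - lo
-- 		if n == 0:
-- 			return (0, 0)
-- 		if n == 1:
-- 			return (1, 0) if file[lo].strip() != "" else (0, 1)
-- 		mid = lo + n // 2
-- 		c1, b1 = count(lo, mid)
-- 		c2, b2 = count(mid, hi)
-- 		return (c1 + c2, b1 + b2)
-- 	c, b = count(0, len(file))
-- 	return {"code": c, "blanks": b}
-- ===== Notes on version B (the rewrite author's own statement) =====
-- stated objective: alternative
-- what changed: Replaces A's sequential two-counter loop with a divide-and-conquer recursion that splits the index range in half, counts (non-blank, blank) pairs in each half independently and sums them.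
import Mathlib
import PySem

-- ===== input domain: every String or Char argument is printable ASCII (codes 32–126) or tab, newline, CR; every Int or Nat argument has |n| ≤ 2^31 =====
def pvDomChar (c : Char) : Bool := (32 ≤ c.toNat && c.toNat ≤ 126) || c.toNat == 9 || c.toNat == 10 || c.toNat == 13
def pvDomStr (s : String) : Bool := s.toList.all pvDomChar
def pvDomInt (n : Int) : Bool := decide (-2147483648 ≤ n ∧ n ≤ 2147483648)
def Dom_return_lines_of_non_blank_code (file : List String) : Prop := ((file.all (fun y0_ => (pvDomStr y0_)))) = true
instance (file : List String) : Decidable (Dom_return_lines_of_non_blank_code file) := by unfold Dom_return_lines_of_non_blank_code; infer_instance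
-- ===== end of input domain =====

-- B replaces A's sequential two-counter loop by a divide-and-conquer count over halves of the index range (objective: alternative).

-- ===== PORT A =====
-- A: one loop with two counters (ctr_code, ctr_blanks), if/else on the stripped line
def return_lines_of_non_blank_code (file : List String) : List (String × Int) :=
  let cs := file.foldl (fun (acc : Int × Int) el =>
    let stripped := PySem.Str.strip el
    if stripped ≠ "" then (acc.1 + 1, acc.2) else (acc.1, acc.2 + 1)) (0, 0)
  [("code", cs.1), ("blanks", cs.2)]

-- ===== PORT B =====
-- B's helper count(lo, hi): divide and conquer on the index range [lo, hi).
-- Indices lo, hi are Python ints that are always ≥ 0, ported as Nat; file[lo] is only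
-- reached with lo < file.length, where List.getD lo "" is exactly Python's file[lo].
def pvCount (file : List String) (lo hi : Nat) : Int × Int :=
  let n := hi - lo
  if n = 0 then (0, 0)
  else if n = 1 then
    if PySem.Str.strip (file.getD lo "") ≠ "" then (1, 0) else (0, 1)
  else
    let mid := lo + n / 2
    let r1 := pvCount file lo mid
    let r2 := pvCount file mid hi
    (r1.1 + r2.1, r1.2 + r2.2)
termination_by hi - lo
decreasing_by all_goals omega

def return_lines_of_non_blank_code_alt (file : List String) : List (String × Int) :=
  let r := pvCount file 0 file.length
  [("code", r.1), ("blanks", r.2)]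

-- ===== PRECONDITION & SPEC =====
def Spec_return_lines_of_non_blank_code (file : List String) (out : List (String × Int)) : Prop := out = return_lines_of_non_blank_code_alt file
instance (file : List String) (out : List (String × Int)) : Decidable (Spec_return_lines_of_non_blank_code file out) := by unfold Spec_return_lines_of_non_blank_code; infer_instance

-- ===== CLAIM (what is proved, stated in full; the proofs are below) =====
def Claim_equal_return_lines_of_non_blank_code : Prop := ∀ (file : List String), Dom_return_lines_of_non_blank_code file → Spec_return_lines_of_non_blank_code file (return_lines_of_non_blank_code file)

-- ===== LEMMAS AND PROOFS =====

-- A's loop invariant: the fold yields (init₁ + countP, init₂ + (length - countP)).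
lemma fold_counters (file : List String) (a b : Int) :
    file.foldl (fun (acc : Int × Int) el =>
      let stripped := PySem.Str.strip el
      if stripped ≠ "" then (acc.1 + 1, acc.2) else (acc.1, acc.2 + 1)) (a, b)
    = (a + ((file.countP (fun el => PySem.Str.strip el ≠ "") : Nat) : Int),
       b + ((file.length : Int) - ((file.countP (fun el => PySem.Str.strip el ≠ "") : Nat) : Int))) := by
  induction file generalizing a b with
  | nil => simp
  | cons h t ih =>
    by_cases hc : PySem.Str.strip h = ""
    · simp only [List.foldl_cons, List.countP_cons, List.length_cons, ih, hc, Prod.ext_iff]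
      simp
      ring
    · simp only [List.foldl_cons, List.countP_cons, List.length_cons, ih, Prod.ext_iff]
      simp [hc]
      ring

-- B's recursion computes the counts over the index range [lo, hi).
lemma pvCount_eq (file : List String) : ∀ (n lo hi : Nat), hi - lo = n →
    pvCount file lo hi =
      ((((List.range' lo (hi - lo)).countP
           (fun i => PySem.Str.strip (file.getD i "") ≠ "")) : Int),
       (((hi - lo) - ((List.range' lo (hi - lo)).countP
           (fun i => PySem.Str.strip (file.getD i "") ≠ "")) : Nat) : Int)) := by
  intro n
  induction n using Nat.strong_induction_on with
  | _ n ih =>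
    intro lo hi hn
    rw [pvCount]
    by_cases h0 : hi - lo = 0
    · simp [h0]
    · by_cases h1 : hi - lo = 1
      · simp only [h1]
        norm_num
        split_ifs with hc <;> simp
      · simp only [h0, h1, if_false]
        have hlt : lo < hi := by omega
        have hm1 : (lo + (hi - lo) / 2) - lo < n := by omega
        have hm2 : hi - (lo + (hi - lo) / 2) < n := by omega
        rw [ih _ hm1 lo _ rfl, ih _ hm2 _ hi rfl]
        have hsplit : List.range' lo (hi - lo) =
            List.range' lo ((lo + (hi - lo) / 2) - lo) ++
            List.range' (lo + (hi - lo) / 2) (hi - (lo + (hi - lo) / 2)) := by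
          have h2 : (lo + (hi - lo) / 2) - lo = (hi - lo) / 2 := by omega
          have h3 := List.range'_append (s := lo) (m := (hi - lo) / 2)
            (n := hi - (lo + (hi - lo) / 2)) (step := 1)
          simp only [Nat.one_mul] at h3
          rw [h2, h3]
          congr 1
          omega
        have c1le := List.countP_le_length
          (p := fun i => decide (PySem.Str.strip (file.getD i "") ≠ ""))
          (l := List.range' lo ((lo + (hi - lo) / 2) - lo))
        have c2le := List.countP_le_length
          (p := fun i => decide (PySem.Str.strip (file.getD i "") ≠ ""))
          (l := List.range' (lo + (hi - lo) / 2) (hi - (lo + (hi - lo) / 2)))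
        simp only [List.length_range'] at c1le c2le
        rw [hsplit, List.countP_append]
        dsimp only
        rw [Prod.mk.injEq]
        constructor <;> push_cast <;> omega

-- over indices starting at lo, counting getD (i - lo) equals counting the list itself
lemma range_countP (q : String → Bool) :
    ∀ (l : List String) (lo : Nat),
      (List.range' lo l.length).countP (fun i => q (l.getD (i - lo) "")) = l.countP q := by
  intro l
  induction l with
  | nil => intro lo; simp
  | cons x t ih =>
    intro lo
    rw [List.length_cons, List.range'_succ, List.countP_cons]
    have hmem : ∀ i ∈ List.range' (lo + 1) t.length,
        (q ((x :: t).getD (i - lo) "") = true ↔ q (t.getD (i - (lo + 1)) "") = true) := by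
      intro i hi
      have : lo + 1 ≤ i := (List.mem_range'_1.mp hi).1
      have h : i - lo = (i - (lo + 1)) + 1 := by omega
      simp [h]
    rw [List.countP_congr hmem, ih, List.countP_cons]
    simp

-- ===== VERDICT (by name: the statement is the Claim_ definition above) =====
theorem return_lines_of_non_blank_code_spec : Claim_equal_return_lines_of_non_blank_code := by
  intro file _
  unfold Spec_return_lines_of_non_blank_code return_lines_of_non_blank_code return_lines_of_non_blank_code_alt
  rw [fold_counters, pvCount_eq file (file.length - 0) 0 file.length rfl]
  have hr := range_countP (fun s => decide (PySem.Str.strip s ≠ "")) file 0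
  simp only [Nat.sub_zero] at hr ⊢
  rw [hr]
  have hle := List.countP_le_length
    (p := fun s => decide (PySem.Str.strip s ≠ "")) (l := file)
  simp only [List.cons.injEq, Prod.mk.injEq, and_true, true_and] at *
  constructor
  · simp
  · omega
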